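-- pv_equiv track=rewrite | github.com/MatzeB/test-suite | utils/compare.py | _determine_common_prefix_suffix
-- ===== SOURCE A (Python) =====
-- def _determine_common_prefix_suffix(names, min_len=8):
--     if len(names) <= 1:
--         return (0, 0)
--     name0 = names[0]
--     prefix = name0
--     prefix_len = len(name0)
--     suffix = name0
--     suffix_len = len(name0)
--     shortest_name = len(name0)
--     for name in names:
--         if len(name) < shortest_name:
--             shortest_name = len(name)
--         while prefix_len > 0 and name[:prefix_len] != prefix:
--             prefix_len -= 1
--             prefix = name0[:prefix_len]
--         while suffix_len > 0 and name[-suffix_len:] != suffix: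
--             suffix_len -= 1
--             suffix = name0[-suffix_len:]
--
--     if suffix[0] != '.' and suffix[0] != '_':
--         suffix_len = 0
--     suffix_len = max(0, min(shortest_name - prefix_len - min_len, suffix_len))
--     prefix_len = max(0, min(shortest_name - suffix_len, prefix_len))
--     return (prefix_len, suffix_len)
-- ===== SOURCE B (Python) =====
-- def _lcp(a, b):
--     k = 0
--     for x, y in zip(a, b):
--         if x != y:
--             break
--         k += 1
--     return k
--
--
-- def _determine_common_prefix_suffix(names, min_len=8):
--     if len(names) <= 1:
--         return (0, 0)
--     name0 = names[0]
--     r0 = name0[::-1]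
--     p = min(_lcp(name0, n) for n in names)
--     s = min(_lcp(r0, n[::-1]) for n in names)
--     shortest = min(len(n) for n in names)
--     ch = name0[-s] if s else name0[0]
--     if ch != '.' and ch != '_':
--         s = 0
--     s = max(0, min(shortest - p - min_len, s))
--     p = max(0, min(shortest - s, p))
--     return (p, s)
-- ===== Notes on version B (the rewrite author's own statement) =====
-- stated objective: alternative
-- what changed: Replaces A's fold over names with candidate-shrinking while loops (repeatedly slicing and comparing shrinking prefix/suffix strings) by independent per-name longest-common-prefix zip scans (on the names and on their reversals) combined with min(), keeping A's '.'/'_' gate and clamping tail.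
import Mathlib
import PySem

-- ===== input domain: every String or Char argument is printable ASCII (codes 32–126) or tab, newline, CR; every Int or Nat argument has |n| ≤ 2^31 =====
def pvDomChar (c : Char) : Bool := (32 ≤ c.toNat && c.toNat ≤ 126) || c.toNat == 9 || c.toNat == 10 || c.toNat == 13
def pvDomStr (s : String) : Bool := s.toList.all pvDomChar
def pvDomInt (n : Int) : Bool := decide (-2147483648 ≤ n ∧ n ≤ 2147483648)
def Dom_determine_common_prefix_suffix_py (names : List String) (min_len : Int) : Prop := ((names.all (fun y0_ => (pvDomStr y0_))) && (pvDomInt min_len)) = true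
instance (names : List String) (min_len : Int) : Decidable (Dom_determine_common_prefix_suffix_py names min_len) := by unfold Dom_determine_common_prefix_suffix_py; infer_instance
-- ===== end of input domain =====

-- ===== PORT A =====
-- B is an alternative decomposition: per-name longest-common-prefix via zip scan and min(),
-- instead of A's candidate-shrinking while loops folded through the list.
-- (equivalence of the RETURN value; neither program mutates its arguments)

-- while prefix_len > 0 and name[:prefix_len] != prefix: prefix_len -= 1 (prefix = name0[:prefix_len])
def pvShrinkPrefix (name0 name : List Char) : Nat → Nat
  | 0 => 0
  | q + 1 => if name.take (q + 1) = name0.take (q + 1) then q + 1 else pvShrinkPrefix name0 name q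

-- while suffix_len > 0 and name[-suffix_len:] != suffix: …; name[-k:] (k>0) = drop (len-k), Nat
-- truncated subtraction matching Python's clamp of an over-long negative slice to the whole string
def pvShrinkSuffix (name0 name : List Char) : Nat → Nat
  | 0 => 0
  | q + 1 =>
    if name.drop (name.length - (q + 1)) = name0.drop (name0.length - (q + 1)) then q + 1
    else pvShrinkSuffix name0 name q

def determine_common_prefix_suffix_py (names : List String) (min_len : Int) : Int × Int :=
  if names.length ≤ 1 then (0, 0) else
  match names with
  | [] => (0, 0)
  | n0 :: _ =>
    let name0 := n0.toList
    let st := names.foldl (fun (st : Nat × Nat × Nat) nm =>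
      let name := nm.toList
      let shortest := if name.length < st.2.2 then name.length else st.2.2
      (pvShrinkPrefix name0 name st.1, pvShrinkSuffix name0 name st.2.1, shortest))
      (name0.length, name0.length, name0.length)
    let p := st.1
    let s := st.2.1
    let shortest := st.2.2
    -- suffix = name0[-s:]: the whole name0 when s = 0 (Python's -0 slice quirk)
    let suffix := if s = 0 then name0 else name0.drop (name0.length - s)
    let c := suffix.headD ' '   -- suffix[0]; Python raises IndexError when suffix = "" (outside Pre_)
    let s1 : Int := if c ≠ '.' ∧ c ≠ '_' then 0 else (s : Int)
    let s2 := max 0 (min ((shortest : Int) - (p : Int) - min_len) s1)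
    let p2 := max 0 (min ((shortest : Int) - s2) (p : Int))
    (p2, s2)

-- ===== PORT B =====
-- _lcp(a, b): count of equal leading pairs of zip(a, b)
def pvLcp (a b : List Char) : Nat :=
  match a, b with
  | x :: a', y :: b' => if x = y then pvLcp a' b' + 1 else 0
  | _, _ => 0

-- min(<nonempty generator>) (the [] case is unreachable: names is nonempty there)
def pvMinNat : List Nat → Nat
  | [] => 0
  | x :: xs => xs.foldl min x

def determine_common_prefix_suffix_py_alt (names : List String) (min_len : Int) : Int × Int :=
  if names.length ≤ 1 then (0, 0) else
  match names with
  | [] => (0, 0)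
  | n0 :: _ =>
    let name0 := n0.toList
    let r0 := name0.reverse
    let p := pvMinNat (names.map fun n => pvLcp name0 n.toList)
    let s := pvMinNat (names.map fun n => pvLcp r0 n.toList.reverse)
    let shortest := pvMinNat (names.map fun n => n.toList.length)
    -- name0[-s] if s else name0[0]; both index raise IndexError on empty name0 (outside Pre_)
    let c := if s ≠ 0 then name0.getD (name0.length - s) ' ' else name0.headD ' '
    let s1 : Int := if c ≠ '.' ∧ c ≠ '_' then 0 else (s : Int)
    let s2 := max 0 (min ((shortest : Int) - (p : Int) - min_len) s1)
    let p2 := max 0 (min ((shortest : Int) - s2) (p : Int))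
    (p2, s2)

-- ===== PRECONDITION & SPEC =====
-- Pre_ excludes only the inputs where both Pythons raise IndexError: two or more names whose
-- first name is the empty string (then suffix = "" and suffix[0] raises).
def Pre_determine_common_prefix_suffix_py (names : List String) (min_len : Int) : Prop :=
  names.length ≤ 1 ∨ names.headD "" ≠ ""
instance (names : List String) (min_len : Int) : Decidable (Pre_determine_common_prefix_suffix_py names min_len) := by
  unfold Pre_determine_common_prefix_suffix_py; infer_instance

def pvWitness_determine_common_prefix_suffix_py : List String × Int := (["ab_t.x", "cd_t.x"], 8)

def Spec_determine_common_prefix_suffix_py (names : List String) (min_len : Int) (out : Int × Int) : Prop := out = determine_common_prefix_suffix_py_alt names min_len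
instance (names : List String) (min_len : Int) (out : Int × Int) : Decidable (Spec_determine_common_prefix_suffix_py names min_len out) := by unfold Spec_determine_common_prefix_suffix_py; infer_instance

-- ===== CLAIM (what is proved, stated in full; the proofs are below) =====
def Claim_equal_determine_common_prefix_suffix_py : Prop := ∀ (names : List String) (min_len : Int), Dom_determine_common_prefix_suffix_py names min_len → Pre_determine_common_prefix_suffix_py names min_len → Spec_determine_common_prefix_suffix_py names min_len (determine_common_prefix_suffix_py names min_len)

-- ===== LEMMAS AND PROOFS =====

theorem pvLcp_self (a : List Char) : pvLcp a a = a.length := by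
  induction a with
  | nil => rfl
  | cons x a ih => simp [pvLcp, ih]

theorem take_eq_iff_le_lcp (q : Nat) (a b : List Char) (hq : q ≤ a.length) :
    b.take q = a.take q ↔ q ≤ pvLcp a b := by
  induction q generalizing a b with
  | zero => simp
  | succ q ih =>
    match a, b with
    | [], _ => simp at hq
    | x :: a', [] => simp [pvLcp]
    | x :: a', y :: b' =>
      have hq' : q ≤ a'.length := by simpa using hq
      simp only [List.take_succ_cons, List.cons.injEq, pvLcp]
      split_ifs with hxy
      · rw [ih a' b' hq']
        constructor
        · rintro ⟨-, h⟩; omega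
        · intro h; exact ⟨hxy.symm, by omega⟩
      · constructor
        · rintro ⟨h, -⟩; exact absurd h.symm hxy
        · omega

theorem shrinkPrefix_eq (a b : List Char) (p : Nat) (hp : p ≤ a.length) :
    pvShrinkPrefix a b p = min p (pvLcp a b) := by
  induction p with
  | zero => simp [pvShrinkPrefix]
  | succ q ih =>
    rw [pvShrinkPrefix]
    by_cases h : b.take (q + 1) = a.take (q + 1)
    · rw [if_pos h]
      have := (take_eq_iff_le_lcp (q + 1) a b hp).mp h
      omega
    · rw [if_neg h]
      have h2 : ¬ (q + 1 ≤ pvLcp a b) := fun hle => h ((take_eq_iff_le_lcp (q + 1) a b hp).mpr hle)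
      rw [ih (by omega)]; omega

theorem drop_sub_eq_rev (n : List Char) (s : Nat) :
    n.drop (n.length - s) = (n.reverse.take s).reverse := by
  rw [List.take_reverse, List.reverse_reverse]

theorem shrinkSuffix_eq (a b : List Char) (p : Nat) (hp : p ≤ a.length) :
    pvShrinkSuffix a b p = min p (pvLcp a.reverse b.reverse) := by
  induction p with
  | zero => simp [pvShrinkSuffix]
  | succ q ih =>
    rw [pvShrinkSuffix]
    have hiff : (b.drop (b.length - (q + 1)) = a.drop (a.length - (q + 1))) ↔
        (q + 1 ≤ pvLcp a.reverse b.reverse) := by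
      rw [drop_sub_eq_rev, drop_sub_eq_rev, List.reverse_inj]
      exact take_eq_iff_le_lcp (q + 1) a.reverse b.reverse (by simpa using hp)
    by_cases h : b.drop (b.length - (q + 1)) = a.drop (a.length - (q + 1))
    · rw [if_pos h]
      have := hiff.mp h
      omega
    · rw [if_neg h]
      have h2 : ¬ (q + 1 ≤ pvLcp a.reverse b.reverse) := fun hle => h (hiff.mpr hle)
      rw [ih (by omega)]; omega

theorem foldA_eq (name0 : List Char) (rest : List String) :
    ∀ (p s sh : Nat), p ≤ name0.length → s ≤ name0.length →
    rest.foldl (fun (st : Nat × Nat × Nat) nm =>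
      let name := nm.toList
      let shortest := if name.length < st.2.2 then name.length else st.2.2
      (pvShrinkPrefix name0 name st.1, pvShrinkSuffix name0 name st.2.1, shortest)) (p, s, sh) =
    (rest.foldl (fun a n => min a (pvLcp name0 n.toList)) p,
     rest.foldl (fun a n => min a (pvLcp name0.reverse n.toList.reverse)) s,
     rest.foldl (fun a n => min a n.toList.length) sh) := by
  induction rest with
  | nil => intro p s sh _ _; rfl
  | cons n rest ih =>
    intro p s sh hp hs
    simp only [List.foldl_cons]
    rw [shrinkPrefix_eq name0 n.toList p hp, shrinkSuffix_eq name0 n.toList s hs]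
    have hsh : (if n.toList.length < sh then n.toList.length else sh) = min sh n.toList.length := by
      split_ifs <;> omega
    rw [hsh]
    exact ih (min p (pvLcp name0 n.toList)) _ _
      (le_trans (min_le_left _ _) hp) (le_trans (min_le_left _ _) hs)

theorem headD_drop (l : List Char) (k : Nat) : (l.drop k).headD ' ' = l.getD k ' ' := by
  rw [List.headD_eq_head?, List.head?_drop, List.getD_eq_getElem?_getD]

-- ===== VERDICT (by name: the statement is the Claim_ definition above) =====
theorem determine_common_prefix_suffix_py_spec : Claim_equal_determine_common_prefix_suffix_py := by
  intro names min_len _ _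
  unfold Spec_determine_common_prefix_suffix_py
  unfold determine_common_prefix_suffix_py determine_common_prefix_suffix_py_alt
  by_cases hlen : names.length ≤ 1
  · simp [hlen]
  · rw [if_neg hlen, if_neg hlen]
    match names, hlen with
    | n0 :: rest, hlen =>
      simp only [List.foldl_cons, List.map_cons, pvMinNat, List.foldl_map]
      set name0 := n0.toList with hname0
      have h1 : pvShrinkPrefix name0 name0 name0.length = name0.length := by
        rw [shrinkPrefix_eq name0 name0 name0.length le_rfl, pvLcp_self]; simp
      have h2 : pvShrinkSuffix name0 name0 name0.length = name0.length := by
        rw [shrinkSuffix_eq name0 name0 name0.length le_rfl, pvLcp_self]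
        simp
      have h3 : (if name0.length < name0.length then name0.length else name0.length) = name0.length := by
        simp
      rw [h1, h2, h3, foldA_eq name0 rest name0.length name0.length name0.length le_rfl le_rfl]
      have h4 : pvLcp name0 name0 = name0.length := pvLcp_self name0
      have h5 : pvLcp name0.reverse name0.reverse = name0.length := by
        rw [pvLcp_self]; simp
      rw [h4, h5]
      set s := rest.foldl (fun a n => min a (pvLcp name0.reverse n.toList.reverse)) name0.length
      by_cases hs : s = 0
      · simp [hs]
      · simp only [if_neg hs, if_pos hs]
        rw [headD_drop]
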